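-- pv_equiv track=rewrite | github.com/Namhunk/OJ | 프로그래머스/3/12938. 최고의 집합/최고의 집합.py | solution
-- ===== SOURCE A (Python) =====
-- def solution(n, s):
--     arr = [s//n for _ in range(n)]
--     SUM = sum(arr)
--     R = [0, n] # +1을 할 범위
--     for i in range(n+1):
--         if SUM + n - i == s:
--             R[0] = i
--
--     for i in range(R[0], R[1]): # R 범위의 값들에 + 1
--         arr[i] += 1
--
--     answer = []
--     if arr[0] == 0: # 가장 작은 값이 0이라면 -1 반환(각 원소는 자연수)
--         answer.append(-1)
--     else:
--         answer.extend(arr)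
--
--     return answer
-- ===== SOURCE B (Python) =====
-- def solution(n, s):
--     q, r = divmod(s, n)
--     if q == 0:
--         return [-1]
--     return [q] * (n - r) + [q + 1] * r
-- ===== Notes on version B (the rewrite author's own statement) =====
-- stated objective: simpler
-- what changed: Replaces A's O(n) scan for the increment start index and the per-element +1 loop with a closed-form divmod construction [q]*(n-r)+[q+1]*r.
import Mathlib
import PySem

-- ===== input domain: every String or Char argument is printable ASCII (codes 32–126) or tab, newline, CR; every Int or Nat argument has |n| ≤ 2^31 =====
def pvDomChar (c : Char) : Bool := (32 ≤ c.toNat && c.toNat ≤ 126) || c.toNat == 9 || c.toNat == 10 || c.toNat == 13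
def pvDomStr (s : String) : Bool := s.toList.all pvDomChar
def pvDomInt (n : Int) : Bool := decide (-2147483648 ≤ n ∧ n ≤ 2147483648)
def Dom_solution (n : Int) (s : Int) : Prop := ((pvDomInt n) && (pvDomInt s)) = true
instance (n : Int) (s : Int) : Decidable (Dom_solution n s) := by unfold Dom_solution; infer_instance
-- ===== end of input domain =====

-- B replaces A's scan for the +1 start index and its increment loop with a closed-form divmod construction (objective: simpler).

-- ===== PORT A =====
def solution (n : Int) (s : Int) : List Int :=
  let arr := (PySem.List.pyRange 0 n 1).map (fun _ => PySem.Int.floordiv s n)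
  let SUM := arr.sum
  -- R = [0, n]; the loop reassigns R[0]
  let R0 := (PySem.List.pyRange 0 (n+1) 1).foldl (fun acc i => if SUM + n - i == s then i else acc) 0
  -- for i in range(R[0], R[1]): arr[i] += 1  (indices are in range for every input Pre_ admits)
  let arr2 := (PySem.List.pyRange R0 n 1).foldl (fun a i => a.modify i.toNat (· + 1)) arr
  -- arr[0] raises IndexError on the empty list; Pre_solution (1 ≤ n) excludes that
  match PySem.List.pyGet? arr2 0 with
  | none => []
  | some v => if v == 0 then [-1] else arr2

-- ===== PORT B =====
def solution_alt (n : Int) (s : Int) : List Int :=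
  let q := PySem.Int.floordiv s n
  let r := PySem.Int.mod s n
  if q == 0 then [-1]
  else List.replicate (n - r).toNat q ++ List.replicate r.toNat (q + 1)

-- ===== PRECONDITION & SPEC =====
-- A raises (ZeroDivisionError for n = 0, IndexError on arr[0] for n < 0 and arr = []): Pre_ keeps n ≥ 1.
def Pre_solution (n : Int) (s : Int) : Prop := 1 ≤ n
instance (n : Int) (s : Int) : Decidable (Pre_solution n s) := by unfold Pre_solution; infer_instance
def pvWitness_solution : Int × Int := (3, 7)

def Spec_solution (n : Int) (s : Int) (out : List Int) : Prop := out = solution_alt n s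
instance (n : Int) (s : Int) (out : List Int) : Decidable (Spec_solution n s out) := by unfold Spec_solution; infer_instance

-- ===== CLAIM (what is proved, stated in full; the proofs are below) =====
def Claim_equal_solution : Prop := ∀ (n : Int) (s : Int), Dom_solution n s → Pre_solution n s → Spec_solution n s (solution n s)

-- ===== LEMMAS AND PROOFS =====

-- the last-assignment loop: with a predicate true exactly at t, the fold returns t iff t is in the list
theorem foldl_last_if (p : Int → Bool) (t : Int) (hp : ∀ i, p i = true ↔ i = t) :
    ∀ (l : List Int) (a : Int),
      l.foldl (fun acc i => if p i then i else acc) a = if t ∈ l then t else a := by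
  intro l
  induction l with
  | nil => intro a; simp
  | cons x xs ih =>
    intro a
    simp only [List.foldl_cons]
    by_cases hx : p x = true
    · have hxt : x = t := (hp x).mp hx
      rw [if_pos hx, ih, hxt]
      simp
    · have hxt : ¬ x = t := fun h => hx ((hp x).mpr h)
      rw [if_neg hx, ih]
      by_cases ht : t ∈ xs <;> simp [List.mem_cons, ht, Ne.symm hxt]

-- modifying at the index right after a prefix
theorem modify_append_cons (X : List Int) (a : Int) (ys : List Int) (f : Int → Int) :
    (X ++ a :: ys).modify X.length f = X ++ f a :: ys := by
  induction X with
  | nil => simp [List.modify]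
  | cons x xs ih => simpa [List.modify] using ih

-- the +1 loop over range(k, k+m) turns the trailing m copies of q into q+1
theorem incr_fold (q : Int) :
    ∀ (m : Nat) (X : List Int) (k : Int), k = (X.length : Int) →
      (PySem.List.pyRange k (k + (m : Int)) 1).foldl (fun a i => a.modify i.toNat (· + 1))
          (X ++ List.replicate m q)
        = X ++ List.replicate m (q + 1) := by
  intro m
  induction m with
  | zero =>
    intro X k hk
    rw [PySem.List.pyRange_one_eq_nil (by omega)]
    simp
  | succ m ih =>
    intro X k hk
    have hk0 : 0 ≤ k := by rw [hk]; positivity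
    rw [PySem.List.pyRange_one_cons (by omega : k < k + ((m + 1 : Nat) : Int))]
    simp only [List.foldl_cons]
    have hset : ((X ++ List.replicate (m + 1) q).modify k.toNat (· + 1))
        = (X ++ [q + 1]) ++ List.replicate m q := by
      have hkn : k.toNat = X.length := by omega
      rw [List.replicate_succ, hkn, modify_append_cons]
      simp
    rw [hset]
    have hlen : k + 1 = (((X ++ [q + 1]).length : Nat) : Int) := by
      simp; omega
    have := ih (X ++ [q + 1]) (k + 1) hlen
    have harg : k + ((m + 1 : Nat) : Int) = (k + 1) + (m : Int) := by push_cast; ring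
    rw [harg, this]
    simp [List.replicate_succ]

theorem solution_eq (n s : Int) (hn : 1 ≤ n) : solution n s = solution_alt n s := by
  set q := PySem.Int.floordiv s n with hq
  set r := PySem.Int.mod s n with hr
  have hr0 : 0 ≤ r := PySem.Int.mod_nonneg s (by omega)
  have hrn : r < n := PySem.Int.mod_lt s (by omega)
  have hqs : q * n + r = s := PySem.Int.floordiv_mul_add_mod s n
  rw [mul_comm] at hqs
  simp only [solution]
  -- arr = replicate n.toNat q
  have harr : (PySem.List.pyRange 0 n 1).map (fun _ => PySem.Int.floordiv s n)
      = List.replicate n.toNat q := by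
    rw [← hq, List.map_const']
    simp [PySem.List.length_pyRange_one]
  rw [harr]
  -- SUM = n * q
  have hSUM : (List.replicate n.toNat q).sum = n * q := by
    rw [List.sum_replicate]
    simp
    omega
  rw [hSUM]
  -- R0 = n - r
  have hcond : ∀ i : Int, ((n * q + n - i == s) = true) ↔ i = n - r := by
    intro i
    constructor
    · intro h; have := of_decide_eq_true h; omega
    · intro h; subst h; simp; omega
  rw [foldl_last_if (fun i => n * q + n - i == s) (n - r) hcond]
  have hmem : (n - r) ∈ PySem.List.pyRange 0 (n + 1) 1 := by
    rw [PySem.List.mem_pyRange_one]; omega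
  rw [if_pos hmem]
  -- increment loop
  have hsplit : List.replicate n.toNat q
      = List.replicate (n - r).toNat q ++ List.replicate r.toNat q := by
    rw [← List.replicate_add]
    congr 1; omega
  have hrange : n = (n - r) + (r.toNat : Int) := by omega
  have hfold : (PySem.List.pyRange (n - r) n 1).foldl (fun a i => a.modify i.toNat (· + 1))
      (List.replicate n.toNat q)
      = List.replicate (n - r).toNat q ++ List.replicate r.toNat (q + 1) := by
    rw [hsplit]
    calc (PySem.List.pyRange (n - r) n 1).foldl (fun a i => a.modify i.toNat (· + 1))
          (List.replicate (n - r).toNat q ++ List.replicate r.toNat q)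
        = (PySem.List.pyRange (n - r) ((n - r) + (r.toNat : Int)) 1).foldl
            (fun a i => a.modify i.toNat (· + 1))
            (List.replicate (n - r).toNat q ++ List.replicate r.toNat q) := by rw [← hrange]
      _ = List.replicate (n - r).toNat q ++ List.replicate r.toNat (q + 1) := by
            apply incr_fold q r.toNat _ (n - r)
            simp [List.length_replicate]; omega
  rw [hfold]
  -- head of the result is q (the first block is nonempty since r < n)
  have hlen1 : 1 ≤ (n - r).toNat := by omega
  have hget : PySem.List.pyGet?
      (List.replicate (n - r).toNat q ++ List.replicate r.toNat (q + 1)) 0 = some q := by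
    have : ∃ m, (n - r).toNat = m + 1 := ⟨(n - r).toNat - 1, by omega⟩
    obtain ⟨m, hm⟩ := this
    rw [hm]
    simp [List.replicate_succ, PySem.List.pyGet?, PySem.List.pyIdx?,
      show (0:Int) ≤ (m:Int) + max r 0 by positivity]
  rw [hget]
  simp only [solution_alt]
  by_cases hq0 : q = 0
  · simp [← hq, hq0]
  · simp [← hq, ← hr, hq0]

-- ===== VERDICT (by name: the statement is the Claim_ definition above) =====
theorem solution_spec : Claim_equal_solution := by
  intro n s _ hpre
  unfold Spec_solution
  exact solution_eq n s hpre
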